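-- pv_equiv track=rewrite | github.com/carrickcheah/llms_project | services/agent_production_planning/log_machine_metrics.py | extract_schedule_path
-- ===== SOURCE A (Python) =====
-- def extract_schedule_path(main_output):
--     """Extract the schedule file path from main.py output."""
--     # Default schedule path if we can't extract it
--     default_path = "schedule.json"
--
--     if not main_output:
--         return default_path
--
--     # Look for the line that contains the schedule path
--     for line in main_output.split('\n'):
--         if "- Gantt chart:" in line:
--             # Extract the path from the line
--             parts = line.split("- Gantt chart:")
--             if len(parts) > 1:
--                 path = parts[1].strip()
--                 # The path might be an absolute path to an HTML file
--                 # We need to convert it to a JSON file path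
--                 if path.endswith('.html'):
--                     path = path.replace('.html', '.json')
--                 return path
--
--     return default_path
-- ===== SOURCE B (Python) =====
-- def extract_schedule_path(main_output):
--     """Extract the schedule file path from main.py output."""
--     marker = "- Gantt chart:"
--     i = main_output.find(marker)
--     if i == -1:
--         return "schedule.json"
--     tail = main_output[i + len(marker):]
--     j = tail.find('\n')
--     if j != -1:
--         tail = tail[:j]
--     path = tail.strip()
--     if path.endswith('.html'):
--         path = path.replace('.html', '.json')
--     return path
-- ===== Notes on version B (the rewrite author's own statement) =====
-- stated objective: simpler
-- what changed: Replaces the split-into-lines loop by a direct find of the first marker in the whole string and a slice up to the next newline; Pre_ excludes inputs where a line contains the marker twice, on which A's split(...)[1] takes only the text between the first two markers while B takes the whole rest of the line - both readings are defensible on that unspecified corner.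
-- outside the precondition, e.g. on extract_schedule_path('- Gantt chart:,- Gantt chart:,\n'): A returns ',', B returns ',- Gantt chart:,'
import Mathlib
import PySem

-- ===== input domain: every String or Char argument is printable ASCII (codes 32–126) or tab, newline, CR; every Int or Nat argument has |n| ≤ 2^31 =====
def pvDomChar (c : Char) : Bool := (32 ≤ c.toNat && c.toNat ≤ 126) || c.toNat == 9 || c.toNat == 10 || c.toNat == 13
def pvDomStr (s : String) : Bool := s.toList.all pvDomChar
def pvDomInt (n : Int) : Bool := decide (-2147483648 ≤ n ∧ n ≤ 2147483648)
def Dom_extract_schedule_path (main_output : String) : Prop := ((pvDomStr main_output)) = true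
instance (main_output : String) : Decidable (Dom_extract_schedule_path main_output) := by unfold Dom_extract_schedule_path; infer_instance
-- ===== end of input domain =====

-- B replaces A's split-into-lines loop by a direct find of the first marker in the whole string
-- plus a slice up to the next newline; objective: simpler.

-- ===== PORT A =====
-- the Python literal "- Gantt chart:" (used by both programs)
def ganttMarker : List Char := "- Gantt chart:".toList

-- A's for-loop over the lines of the output
def extractLineA : List (List Char) → List Char
  | [] => "schedule.json".toList
  | line :: rest =>
    if PySem.Chars.isIn ganttMarker line then
      let parts := PySem.Chars.splitOn line ganttMarker
      if parts.length > 1 then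
        let path := PySem.Chars.strip (parts.getD 1 [])
        if PySem.Chars.endswith path ".html".toList then
          PySem.Chars.replace path ".html".toList ".json".toList
        else path
      else extractLineA rest
    else extractLineA rest

def extract_schedule_path (main_output : String) : String :=
  if main_output == "" then "schedule.json"
  else String.ofList (extractLineA (PySem.Chars.splitOn main_output.toList ['\n']))

-- ===== PORT B =====
def extractFindB (s : List Char) : List Char :=
  let i := PySem.Chars.find s ganttMarker
  if i = -1 then "schedule.json".toList
  else
    let tail := PySem.Chars.slice s (some (i + ganttMarker.length)) none
    let j := PySem.Chars.find tail ['\n']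
    let tail := if j ≠ -1 then PySem.Chars.slice tail none (some j) else tail
    let path := PySem.Chars.strip tail
    if PySem.Chars.endswith path ".html".toList then
      PySem.Chars.replace path ".html".toList ".json".toList
    else path

def extract_schedule_path_alt (main_output : String) : String :=
  String.ofList (extractFindB main_output.toList)

-- ===== PRECONDITION & SPEC =====
-- Pre_ excludes inputs in which some line contains the marker "- Gantt chart:" twice: there
-- A returns only the text between the first two markers (an artefact of split(...)[1]) while B
-- returns the whole rest of the line; both readings are defensible on that unspecified corner.
def Pre_extract_schedule_path (main_output : String) : Prop :=
  ∀ line ∈ PySem.Chars.splitOn main_output.toList ['\n'],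
    ¬ ganttMarker <:+:
      line.drop ((PySem.Chars.find line ganttMarker).toNat + ganttMarker.length)
instance (main_output : String) : Decidable (Pre_extract_schedule_path main_output) := by
  unfold Pre_extract_schedule_path; infer_instance

def pvWitness_extract_schedule_path : String := "done\n- Gantt chart: /tmp/out.html\nbye"

def Spec_extract_schedule_path (main_output : String) (out : String) : Prop := out = extract_schedule_path_alt main_output
instance (main_output : String) (out : String) : Decidable (Spec_extract_schedule_path main_output out) := by unfold Spec_extract_schedule_path; infer_instance

-- ===== CLAIM (what is proved, stated in full; the proofs are below) =====
def Claim_equal_extract_schedule_path : Prop := ∀ (main_output : String), Dom_extract_schedule_path main_output → Pre_extract_schedule_path main_output → Spec_extract_schedule_path main_output (extract_schedule_path main_output)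

-- ===== LEMMAS AND PROOFS =====

lemma drop_append_past {α : Type} (a b : List α) (c : α) (n : Nat) :
    (a ++ c :: b).drop (a.length + 1 + n) = b.drop n := by
  rw [show a.length + 1 + n = a.length + (1 + n) by omega, List.drop_append]
  simp only [List.drop_of_length_le (by omega : a.length ≤ a.length + (1+n)), List.nil_append]
  rw [Nat.add_sub_cancel_left, show 1 + n = n + 1 by omega, List.drop_succ_cons]

lemma find_unique {s sub : List Char} {q : Nat} (hq : sub <+: s.drop q)
    (hmin : ∀ t < q, ¬ sub <+: s.drop t) : PySem.Chars.find s sub = q := by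
  have hinf : sub <:+: s := hq.isInfix.trans (List.drop_suffix q s).isInfix
  have h0 : 0 ≤ PySem.Chars.find s sub := (PySem.Chars.find_nonneg_iff s sub).mpr hinf
  obtain ⟨h1, h2⟩ := PySem.Chars.find_spec h0
  rcases lt_trichotomy (PySem.Chars.find s sub).toNat q with h | h | h
  · exact absurd h1 (hmin _ h)
  · omega
  · exact absurd hq (h2 q h)

lemma prefix_of_append_of_le {M u v : List Char} (h : M <+: u ++ v)
    (hle : M.length ≤ u.length) : M <+: u := by
  have h1 : M = (u ++ v).take M.length := List.prefix_iff_eq_take.mp h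
  rw [List.take_append_of_le_length hle] at h1
  exact h1 ▸ List.take_prefix M.length u

lemma prefix_of_append_no_nl {M u b : List Char} (hnl : '\n' ∉ M)
    (h : M <+: u ++ '\n' :: b) : M <+: u := by
  by_cases hle : M.length ≤ u.length
  · exact prefix_of_append_of_le h hle
  · exfalso
    have hlen : u.length < M.length := by omega
    have hg := h.getElem (i := u.length) hlen
    have h2 : (u ++ '\n' :: b)[u.length]'(by simp) = '\n' := by
      simp [List.getElem_append_right]
    have h3 : M[u.length]'hlen = '\n' := hg.trans h2
    exact hnl (h3 ▸ List.getElem_mem _)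

lemma find_append_of_infix_left {M a : List Char} (t : List Char) (h : M <:+: a) :
    PySem.Chars.find (a ++ t) M = PySem.Chars.find a M := by
  have h0 : 0 ≤ PySem.Chars.find a M := (PySem.Chars.find_nonneg_iff a M).mpr h
  obtain ⟨h1, h2⟩ := PySem.Chars.find_spec h0
  set q := (PySem.Chars.find a M).toNat with hqdef
  have hqa : q ≤ a.length := by have := PySem.Chars.find_le_length a M; omega
  have hMlen : q + M.length ≤ a.length := by
    have := h1.length_le; simp only [List.length_drop] at this; omega
  have key : PySem.Chars.find (a ++ t) M = (q : Int) := by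
    apply find_unique
    · rw [List.drop_append_of_le_length hqa]
      exact h1.trans (List.prefix_append _ t)
    · intro t' ht' hcon
      rw [List.drop_append_of_le_length (by omega)] at hcon
      exact h2 t' ht' (prefix_of_append_of_le hcon (by simp only [List.length_drop]; omega))
  rw [key]; omega

lemma find_append_skip {M a b : List Char} (hnl : '\n' ∉ M)
    (ha : ¬ M <:+: a) :
    PySem.Chars.find (a ++ '\n' :: b) M =
      if PySem.Chars.find b M = -1 then -1 else (a.length : Int) + 1 + PySem.Chars.find b M := by
  by_cases hb : PySem.Chars.find b M = -1
  · rw [if_pos hb]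
    rw [PySem.Chars.find_eq_neg_one_iff] at hb ⊢
    intro hcon
    have : ∃ j, M <+: (a ++ '\n' :: b).drop j := by
      rw [PySem.Chars.exists_prefix_drop_iff_isIn, PySem.Chars.isIn_iff_infix]; exact hcon
    obtain ⟨j, hj⟩ := this
    by_cases hja : j ≤ a.length
    · rw [List.drop_append_of_le_length hja] at hj
      exact ha ((prefix_of_append_no_nl hnl hj).isInfix.trans (List.drop_suffix j a).isInfix)
    · have hj' : j = a.length + 1 + (j - a.length - 1) := by omega
      rw [hj', drop_append_past] at hj
      exact hb (hj.isInfix.trans (List.drop_suffix _ b).isInfix)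
  · rw [if_neg hb]
    have h0 : 0 ≤ PySem.Chars.find b M := by
      have := PySem.Chars.neg_one_le_find b M; omega
    obtain ⟨h1, h2⟩ := PySem.Chars.find_spec h0
    set qb := (PySem.Chars.find b M).toNat with hq
    have key : PySem.Chars.find (a ++ '\n' :: b) M = ((a.length + 1 + qb : Nat) : Int) := by
      apply find_unique
      · rw [drop_append_past]
        exact h1
      · intro t' ht' hcon
        by_cases hta : t' ≤ a.length
        · rw [List.drop_append_of_le_length hta] at hcon
          exact ha ((prefix_of_append_no_nl hnl hcon).isInfix.trans (List.drop_suffix t' a).isInfix)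
        · have ht'' : t' = a.length + 1 + (t' - a.length - 1) := by omega
          rw [ht'', drop_append_past] at hcon
          exact h2 _ (by omega) hcon
    rw [key]; omega

lemma find_nl_append {u b : List Char} (hu : '\n' ∉ u) :
    PySem.Chars.find (u ++ '\n' :: b) ['\n'] = u.length := by
  apply find_unique
  · rw [List.drop_left]
    simp
  · intro t ht hcon
    rw [List.drop_append_of_le_length (by omega)] at hcon
    rw [List.drop_eq_getElem_cons ht] at hcon
    simp only [List.cons_append, List.cons_prefix_cons] at hcon
    exact hu (hcon.1 ▸ List.getElem_mem _)

lemma find_nl_none {u : List Char} (hu : '\n' ∉ u) :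
    PySem.Chars.find u ['\n'] = -1 := by
  rw [PySem.Chars.find_eq_neg_one_iff]
  intro hcon
  exact hu (hcon.sublist.subset (by simp))

def glueHead (p : List Char) : List (List Char) → List (List Char)
  | [] => [p]
  | x :: xs => (p ++ x) :: xs

def splitRec (sep : List Char) (l : List Char) : List (List Char) :=
  if h : sep ≠ [] ∧ sep.isPrefixOf l then
    [] :: splitRec sep (l.drop sep.length)
  else
    match l with
    | [] => [[]]
    | c :: rest => glueHead [c] (splitRec sep rest)
  termination_by l.length
  decreasing_by
    · have h1 := (List.isPrefixOf_iff_prefix.mp h.2).length_le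
      have h2 : 0 < sep.length := List.length_pos_iff.mpr h.1
      simp only [List.length_drop]; omega
    · simp

lemma splitRec_ne_nil (sep l : List Char) : splitRec sep l ≠ [] := by
  rw [splitRec]
  split
  · simp
  · split
    · simp
    · rename_i c rest _
      cases splitRec sep rest <;> simp [glueHead]

lemma glueHead_nil {l : List (List Char)} (h : l ≠ []) : glueHead [] l = l := by
  cases l with
  | nil => exact absurd rfl h
  | cons x xs => simp [glueHead]

lemma splitOn_go_spec {sep : List Char} (hsep : sep ≠ []) :
    ∀ (fuel : Nat) (l cur : List Char) (acc : List (List Char)), l.length < fuel →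
      PySem.Chars.splitOn.go sep fuel l cur acc =
        acc.reverse ++ glueHead cur.reverse (splitRec sep l) := by
  intro fuel
  induction fuel with
  | zero => intro l cur acc h; omega
  | succ n ih =>
    intro l cur acc h
    match l with
    | [] =>
      rw [PySem.Chars.splitOn.go]
      · rw [splitRec]
        simp [hsep, glueHead]
      · omega
    | c :: rest =>
      rw [PySem.Chars.splitOn.go]
      by_cases hp : sep.isPrefixOf (c :: rest)
      · rw [if_pos hp]
        have hlen := (List.isPrefixOf_iff_prefix.mp hp).length_le
        have hpos : 0 < sep.length := List.length_pos_iff.mpr hsep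
        rw [ih _ _ _ (by simp only [List.length_drop]; simp at h ⊢; omega)]
        rw [List.reverse_nil, glueHead_nil (splitRec_ne_nil _ _)]
        conv_rhs => rw [splitRec]
        rw [dif_pos ⟨hsep, hp⟩]
        rcases hsr : splitRec sep (List.drop sep.length (c :: rest)) with _ | ⟨x, xs⟩
        · exact absurd hsr (splitRec_ne_nil _ _)
        · simp [glueHead]
      · rw [if_neg hp]
        rw [ih _ _ _ (by simp at h ⊢; omega)]
        conv_rhs => rw [splitRec]
        rw [dif_neg (by simp [hp])]
        show _ = acc.reverse ++ glueHead cur.reverse (glueHead [c] (splitRec sep rest))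
        rcases hsr : splitRec sep rest with _ | ⟨x, xs⟩
        · exact absurd hsr (splitRec_ne_nil _ _)
        · simp [glueHead]

lemma splitOn_eq_splitRec {sep : List Char} (hsep : sep ≠ []) (l : List Char) :
    PySem.Chars.splitOn l sep = splitRec sep l := by
  rw [PySem.Chars.splitOn, splitOn_go_spec hsep _ _ _ _ (by omega)]
  simp only [List.reverse_nil, List.nil_append]
  rw [glueHead_nil (splitRec_ne_nil _ _)]

lemma find_eq_zero_of_prefix {sep l : List Char} (hp : sep.isPrefixOf l) :
    PySem.Chars.find l sep = 0 := by
  apply find_unique (q := 0) (by simpa using List.isPrefixOf_iff_prefix.mp hp)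
  omega

lemma splitRec_of_not_infix {sep l : List Char} (hsep : sep ≠ []) (h : ¬ sep <:+: l) :
    splitRec sep l = [l] := by
  induction l with
  | nil => rw [splitRec]; simp [hsep]
  | cons c rest ih =>
    rw [splitRec]
    have hp : ¬ sep.isPrefixOf (c :: rest) := fun hc =>
      h (List.isPrefixOf_iff_prefix.mp hc).isInfix
    rw [dif_neg (by simp [hp])]
    show glueHead [c] (splitRec sep rest) = [c :: rest]
    rw [ih (fun hc => h (hc.trans (List.suffix_cons c rest).isInfix))]
    simp [glueHead]

lemma find_cons (c : Char) (t sub : List Char) :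
    PySem.Chars.find (c :: t) sub =
      if sub.isPrefixOf (c :: t) then 0
      else if PySem.Chars.find t sub = -1 then -1 else PySem.Chars.find t sub + 1 := by
  by_cases hp : sub.isPrefixOf (c :: t)
  · rw [if_pos hp, find_eq_zero_of_prefix hp]
  · rw [if_neg hp]
    by_cases ht : PySem.Chars.find t sub = -1
    · rw [if_pos ht]
      rw [PySem.Chars.find_eq_neg_one_iff] at ht
      rw [PySem.Chars.find_eq_neg_one_iff]
      intro hcon
      rcases hcon with ⟨s, u, hsu⟩
      rcases s with _ | ⟨s0, s'⟩
      · exact hp (List.isPrefixOf_iff_prefix.mpr ⟨u, by simpa using hsu⟩)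
      · exact ht ⟨s', u, by injection hsu⟩
    · rw [if_neg ht]
      have h0 : 0 ≤ PySem.Chars.find t sub := by
        have := PySem.Chars.neg_one_le_find t sub; omega
      obtain ⟨h1, h2⟩ := PySem.Chars.find_spec h0
      set q := (PySem.Chars.find t sub).toNat with hq
      have key : PySem.Chars.find (c :: t) sub = ((q + 1 : Nat) : Int) := by
        apply find_unique
        · rw [List.drop_succ_cons]; exact h1
        · intro t' ht' hcon
          match t' with
          | 0 => exact hp (List.isPrefixOf_iff_prefix.mpr hcon)
          | (t'' + 1) =>
            rw [List.drop_succ_cons] at hcon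
            exact h2 t'' (by omega) hcon
      rw [key]; omega

lemma splitRec_of_infix {sep l : List Char} (hsep : sep ≠ []) (h : sep <:+: l) :
    splitRec sep l =
      l.take (PySem.Chars.find l sep).toNat ::
        splitRec sep (l.drop ((PySem.Chars.find l sep).toNat + sep.length)) := by
  induction l with
  | nil =>
    exfalso
    have h1 := h.length_le
    simp only [List.length_nil, Nat.le_zero, List.length_eq_zero_iff] at h1
    exact hsep h1
  | cons c rest ih =>
    by_cases hp : sep.isPrefixOf (c :: rest)
    · rw [splitRec, dif_pos ⟨hsep, hp⟩, find_eq_zero_of_prefix hp]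
      simp
    · have hir : sep <:+: rest := by
        rcases h with ⟨s, t, hst⟩
        rcases s with _ | ⟨s0, s'⟩
        · exact absurd (List.isPrefixOf_iff_prefix.mpr ⟨t, by simpa using hst⟩) hp
        · exact ⟨s', t, by injection hst⟩
      have hfr : 0 ≤ PySem.Chars.find rest sep := (PySem.Chars.find_nonneg_iff rest sep).mpr hir
      have hfc : PySem.Chars.find (c :: rest) sep = PySem.Chars.find rest sep + 1 := by
        rw [find_cons, if_neg hp, if_neg (by omega)]
      rw [splitRec, dif_neg (by simp [hp])]
      show glueHead [c] (splitRec sep rest) = _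
      rw [ih hir, hfc]
      have htn : (PySem.Chars.find rest sep + 1).toNat = (PySem.Chars.find rest sep).toNat + 1 := by omega
      rw [htn]
      simp only [glueHead, List.take_succ_cons]
      rw [show (PySem.Chars.find rest sep).toNat + 1 + sep.length
            = (PySem.Chars.find rest sep).toNat + sep.length + 1 by omega, List.drop_succ_cons]
      simp

lemma no_nl_take_find (s : List Char) : '\n' ∉ s.take (PySem.Chars.find s ['\n']).toNat := by
  intro hmem
  rw [List.mem_take_iff_getElem] at hmem
  obtain ⟨j, hj, hget⟩ := hmem
  have h0 : 0 ≤ PySem.Chars.find s ['\n'] := by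
    by_contra hneg
    have : (PySem.Chars.find s ['\n']).toNat = 0 := by omega
    omega
  obtain ⟨h1, h2⟩ := PySem.Chars.find_spec h0
  apply h2 j (by omega)
  rw [List.drop_eq_getElem_cons (by omega), hget]
  simp

-- facts about the marker literal
lemma gM_ne : ganttMarker ≠ [] := by decide
lemma gM_no_nl : '\n' ∉ ganttMarker := by decide

-- B ignores a marker-free first line
lemma extractFindB_skip {a b : List Char} (ha : ¬ ganttMarker <:+: a) :
    extractFindB (a ++ '\n' :: b) = extractFindB b := by
  have hfs := find_append_skip gM_no_nl ha (b := b)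
  by_cases hb : PySem.Chars.find b ganttMarker = -1
  · simp only [extractFindB]
    rw [hfs]
    simp [hb]
  · have h0 : 0 ≤ PySem.Chars.find b ganttMarker := by
      have := PySem.Chars.neg_one_le_find b ganttMarker; omega
    simp only [extractFindB]
    rw [hfs]
    simp only [if_neg hb]
    rw [if_neg (by omega : ¬ ((a.length : Int) + 1 + PySem.Chars.find b ganttMarker = -1))]
    have hslice :
        PySem.Chars.slice (a ++ '\n' :: b)
            (some ((a.length : Int) + 1 + PySem.Chars.find b ganttMarker + ganttMarker.length)) none
          = PySem.Chars.slice b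
            (some (PySem.Chars.find b ganttMarker + ganttMarker.length)) none := by
      simp only [PySem.Chars.slice_eq_listSlice]
      rw [PySem.List.slice_from _ (by omega), PySem.List.slice_from _ (by omega)]
      rw [show ((a.length : Int) + 1 + PySem.Chars.find b ganttMarker + ganttMarker.length).toNat
            = a.length + 1 + (PySem.Chars.find b ganttMarker + ganttMarker.length).toNat by omega]
      exact drop_append_past a b '\n' _
    rw [hslice]

-- shared case: the first line containing the marker (whose post-marker part has no second marker)
lemma line_found {l1 : List Char} (rest : List (List Char)) (tail : List Char)
    (hm : ganttMarker <:+: l1) (hl1 : '\n' ∉ l1)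
    (hsuf : ¬ ganttMarker <:+:
      l1.drop ((PySem.Chars.find l1 ganttMarker).toNat + ganttMarker.length))
    (hshape : tail = [] ∨ ∃ b, tail = '\n' :: b) :
    extractLineA (l1 :: rest) = extractFindB (l1 ++ tail) := by
  have h0 : 0 ≤ PySem.Chars.find l1 ganttMarker := (PySem.Chars.find_nonneg_iff _ _).mpr hm
  obtain ⟨hq1, hq2⟩ := PySem.Chars.find_spec h0
  set q := (PySem.Chars.find l1 ganttMarker).toNat with hqdef
  have hq14 : q + ganttMarker.length ≤ l1.length := by
    have := hq1.length_le
    simp only [List.length_drop] at this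
    have := PySem.Chars.find_le_length l1 ganttMarker
    omega
  -- the A side
  have hIsIn : PySem.Chars.isIn ganttMarker l1 = true := (PySem.Chars.isIn_iff_infix _ _).mpr hm
  have hparts : PySem.Chars.splitOn l1 ganttMarker
      = l1.take q :: splitRec ganttMarker (l1.drop (q + ganttMarker.length)) := by
    rw [splitOn_eq_splitRec gM_ne, splitRec_of_infix gM_ne hm]
  set suf := l1.drop (q + ganttMarker.length) with hsufdef
  have hsufnl : '\n' ∉ suf := fun hc => hl1 ((List.drop_sublist _ _).subset hc)
  have hlen2 : (l1.take q :: splitRec ganttMarker suf).length > 1 := by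
    have := splitRec_ne_nil ganttMarker suf
    simp only [List.length_cons]
    have : 0 < (splitRec ganttMarker suf).length := List.length_pos_iff.mpr this
    omega
  have hA : extractLineA (l1 :: rest)
      = (let path := PySem.Chars.strip ((splitRec ganttMarker suf).getD 0 []);
         if PySem.Chars.endswith path ".html".toList then
           PySem.Chars.replace path ".html".toList ".json".toList
         else path) := by
    simp only [extractLineA, hIsIn, if_true, hparts, if_pos hlen2]
    simp [List.getD]
  have hhead : (splitRec ganttMarker suf).getD 0 [] = suf := by
    rw [splitRec_of_not_infix gM_ne hsuf]
    simp
  rw [hA, hhead]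
  -- the B side
  have hfind : PySem.Chars.find (l1 ++ tail) ganttMarker = (q : Int) := by
    rw [find_append_of_infix_left tail hm]
    omega
  simp only [extractFindB, hfind]
  rw [if_neg (by omega : ¬ ((q : Int) = -1))]
  have hslice1 : PySem.Chars.slice (l1 ++ tail) (some ((q : Int) + ganttMarker.length)) none
      = suf ++ tail := by
    simp only [PySem.Chars.slice_eq_listSlice]
    rw [PySem.List.slice_from _ (by omega),
        show ((q : Int) + ganttMarker.length).toNat = q + ganttMarker.length by omega,
        List.drop_append_of_le_length hq14]
  rw [hslice1]
  have htail1 : (if PySem.Chars.find (suf ++ tail) ['\n'] ≠ -1 then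
        PySem.Chars.slice (suf ++ tail) none (some (PySem.Chars.find (suf ++ tail) ['\n']))
      else suf ++ tail) = suf := by
    rcases hshape with htl | ⟨b, htl⟩
    · subst htl
      simp only [List.append_nil]
      rw [if_neg (by simp [find_nl_none hsufnl])]
    · subst htl
      rw [find_nl_append hsufnl, if_pos (by omega)]
      simp only [PySem.Chars.slice_eq_listSlice]
      rw [PySem.List.slice_to _ (by omega)]
      rw [show ((suf.length : Int)).toNat = suf.length by omega]
      exact List.take_left
  rw [htail1]

-- the list-level precondition: every line's post-first-marker part has no second marker
def PreL (s : List Char) : Prop :=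
  ∀ line ∈ PySem.Chars.splitOn s ['\n'],
    ¬ ganttMarker <:+:
      line.drop ((PySem.Chars.find line ganttMarker).toNat + ganttMarker.length)

-- the main equivalence, at the character-list level (fuel = an upper bound on the length)
lemma key_fuel : ∀ (n : Nat) (s : List Char), s.length ≤ n → PreL s →
    extractLineA (PySem.Chars.splitOn s ['\n']) = extractFindB s := by
  intro n
  induction n with
  | zero =>
    intro s hs _
    have h : s = [] := List.length_eq_zero_iff.mp (Nat.le_zero.mp hs)
    subst h; decide
  | succ n ih =>
    intro s hs hpre
    by_cases hnl : '\n' ∈ s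
    · -- s has a newline: decompose at the first one
      have hinf : ['\n'] <:+: s := by
        obtain ⟨u, v, huv⟩ := List.append_of_mem hnl
        exact ⟨u, v, by simp [huv]⟩
      have h0 : 0 ≤ PySem.Chars.find s ['\n'] := (PySem.Chars.find_nonneg_iff _ _).mpr hinf
      obtain ⟨h1, h2⟩ := PySem.Chars.find_spec h0
      set p := (PySem.Chars.find s ['\n']).toNat with hp
      have hplen : p < s.length := by
        have := h1.length_le
        simp only [List.length_drop, List.length_cons, List.length_nil] at this
        have := PySem.Chars.find_le_length s ['\n']
        omega
      have hsp : s[p]'hplen = '\n' := by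
        rw [List.drop_eq_getElem_cons hplen] at h1
        exact (List.cons_prefix_cons.mp h1).1.symm
      have hdecomp : s = s.take p ++ '\n' :: s.drop (p + 1) := by
        conv_lhs => rw [← List.take_append_drop p s]
        rw [List.drop_eq_getElem_cons hplen, hsp]
      have hl1nl : '\n' ∉ s.take p := no_nl_take_find s
      have hA : PySem.Chars.splitOn s ['\n'] = s.take p :: splitRec ['\n'] (s.drop (p + 1)) := by
        rw [splitOn_eq_splitRec (by decide), splitRec_of_infix (by decide) hinf]
        simp only [← hp, List.length_cons, List.length_nil]
      have hsplit_rest : PySem.Chars.splitOn (s.drop (p + 1)) ['\n']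
          = splitRec ['\n'] (s.drop (p + 1)) := splitOn_eq_splitRec (by decide) _
      have hpre_head := hpre (s.take p) (by rw [hA]; exact List.mem_cons_self)
      rw [hA]
      by_cases hm1 : ganttMarker <:+: s.take p
      · rw [show extractFindB s = extractFindB (s.take p ++ '\n' :: s.drop (p + 1)) by rw [← hdecomp]]
        exact line_found _ ('\n' :: s.drop (p + 1)) hm1 hl1nl hpre_head (Or.inr ⟨_, rfl⟩)
      · have hIsIn : PySem.Chars.isIn ganttMarker (s.take p) = false :=
          (PySem.Chars.isIn_eq_false_iff _ _).mpr hm1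
        have hAstep : extractLineA (s.take p :: splitRec ['\n'] (s.drop (p + 1)))
            = extractLineA (splitRec ['\n'] (s.drop (p + 1))) := by
          simp [extractLineA, hIsIn]
        have hpre_rest : PreL (s.drop (p + 1)) := by
          intro line hline
          exact hpre line (by rw [hA]; exact List.mem_cons_of_mem _ (hsplit_rest ▸ hline))
        rw [hAstep, ← hsplit_rest]
        rw [ih _ (by simp only [List.length_drop]; omega) hpre_rest]
        rw [show extractFindB s = extractFindB (s.take p ++ '\n' :: s.drop (p + 1)) by rw [← hdecomp]]
        exact (extractFindB_skip hm1).symm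
    · -- no newline: a single line
      have hnotinf : ¬ ['\n'] <:+: s := fun hc => hnl (hc.sublist.subset (by simp))
      have hA : PySem.Chars.splitOn s ['\n'] = [s] := by
        rw [splitOn_eq_splitRec (by decide), splitRec_of_not_infix (by decide) hnotinf]
      have hpre_head := hpre s (by rw [hA]; exact List.mem_cons_self)
      rw [hA]
      by_cases hm1 : ganttMarker <:+: s
      · rw [show extractFindB s = extractFindB (s ++ []) by simp]
        exact line_found _ [] hm1 hnl hpre_head (Or.inl rfl)
      · have hIsIn : PySem.Chars.isIn ganttMarker s = false :=
          (PySem.Chars.isIn_eq_false_iff _ _).mpr hm1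
        have hBfind : PySem.Chars.find s ganttMarker = -1 :=
          (PySem.Chars.find_eq_neg_one_iff _ _).mpr hm1
        simp [extractLineA, hIsIn, extractFindB, hBfind]

-- ===== VERDICT (by name: the statement is the Claim_ definition above) =====
theorem extract_schedule_path_spec : Claim_equal_extract_schedule_path := by
  intro m _ hpre
  unfold Spec_extract_schedule_path extract_schedule_path extract_schedule_path_alt
  by_cases hm : m = ""
  · subst hm; decide
  · simp only [beq_iff_eq, if_neg hm]
    rw [key_fuel m.toList.length m.toList le_rfl hpre]
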